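-- pv_equiv track=rewrite | github.com/Stevehh251/CURSA4 | 4_render_system/metrics.py | generate_segmentation_str
-- ===== SOURCE A (Python) =====
-- def str_prefix(parsed_string: list, prefix_len: int):
--     return "/".join(parsed_string[:prefix_len])
--
-- def generate_segmentation_str(xpaths: list):
--     '''
--         Эта функция берет список строк xpath и для каждого xpath находит такой минимальный префикс,
--         что он не содержит других элементов списка
--         Возвращает список уникальных префиксов
--     '''
--     xpaths = [xpath.split('/') for xpath in xpaths]
--     unique_xpaths = []
--
--     for xpath in xpaths:
--         for prefix_len in range(1, len(xpath)):
--             prefix = str_prefix(xpath, prefix_len)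
--
--             unique_prefix = True
--
--             for other_xpath in xpaths:
--                 if other_xpath != xpath:
--                     other_prefix = str_prefix(other_xpath, prefix_len)
--
--                     if other_prefix == prefix:
--                         unique_prefix = False
--                         break
--
--             if unique_prefix:
--                 unique_xpaths.append(prefix)
--                 break
--         else:
--             prefix = str_prefix(xpath, None)
--             unique_xpaths.append(prefix)
--
--     return unique_xpaths
-- ===== SOURCE B (Python) =====
-- def generate_segmentation_str(xpaths: list):
--     # Same result as A by a different route: count, per prefix length, how many
--     # distinct paths share each joined prefix; a prefix is unique iff its count is 1.
--     split = [tuple(x.split('/')) for x in xpaths]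
--     distinct = list(dict.fromkeys(split))
--     max_len = 1
--     for t in split:
--         max_len = max(max_len, len(t))
--     keys = [(L, "/".join(t[:L])) for t in distinct for L in range(1, max_len)]
--     counts = {}
--     for k in keys:
--         counts[k] = counts.get(k, 0) + 1
--     result = []
--     for t in split:
--         L = next((L for L in range(1, len(t)) if counts.get((L, "/".join(t[:L])), 0) == 1), None)
--         result.append("/".join(t if L is None else t[:L]))
--     return result
-- ===== Notes on version B (the rewrite author's own statement) =====
-- stated objective: alternative
-- what changed: replaces A's per-path-per-length inner scan over all other paths by a counter keyed by (prefix length, joined prefix) built once over the distinct paths, so each path is classified by dictionary lookups; it trades A's early-exit inner scans for a one-time precomputation over all prefix lengths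
import Mathlib
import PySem

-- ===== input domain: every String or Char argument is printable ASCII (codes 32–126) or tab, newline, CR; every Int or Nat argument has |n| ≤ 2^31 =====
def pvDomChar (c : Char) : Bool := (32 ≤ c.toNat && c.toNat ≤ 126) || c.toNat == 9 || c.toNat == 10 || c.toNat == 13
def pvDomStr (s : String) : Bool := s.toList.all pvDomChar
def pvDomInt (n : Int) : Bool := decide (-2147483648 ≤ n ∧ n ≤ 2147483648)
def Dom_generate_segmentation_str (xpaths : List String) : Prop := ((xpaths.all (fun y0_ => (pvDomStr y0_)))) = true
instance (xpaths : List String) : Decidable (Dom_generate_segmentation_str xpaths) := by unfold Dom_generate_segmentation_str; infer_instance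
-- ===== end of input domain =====

-- B replaces A's all-pairs prefix comparison by a counter keyed by (prefix length, joined prefix)
-- built once over the distinct paths, then classifies each path by dictionary lookups (alternative
-- algorithm, same result).


-- x.split('/'): the separator "/" is a nonempty literal, so split? never returns none and getD [] is exact
def pySplitSlash (x : String) : List String :=
  (PySem.Str.split? x "/").getD []

-- ===== PORT A =====
-- str_prefix(parsed_string, prefix_len) = "/".join(parsed_string[:prefix_len])
def str_prefix (parsed_string : List String) (prefix_len : Option Int) : String :=
  PySem.Str.join "/" (PySem.List.slice parsed_string none prefix_len)

-- inner 'for other_xpath in xpaths: …' loop; returns the final value of unique_prefix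
def pvCheckA (xs : List (List String)) (xpath : List String) (pre : String) (prefix_len : Int) : Bool :=
  match xs with
  | [] => true
  | other :: rest =>
    if other ≠ xpath then
      (if str_prefix other (some prefix_len) = pre then false
       else pvCheckA rest xpath pre prefix_len)
    else pvCheckA rest xpath pre prefix_len

-- 'for prefix_len in range(1, len(xpath)): … else: …' — returns the string appended for this xpath
def pvFindA (xs : List (List String)) (xpath : List String) : List Int → String
  | [] => str_prefix xpath none
  | prefix_len :: rest =>
    let pre := str_prefix xpath (some prefix_len)
    if pvCheckA xs xpath pre prefix_len then pre else pvFindA xs xpath rest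

def generate_segmentation_str (xpaths : List String) : List String :=
  let xs := xpaths.map pySplitSlash
  xs.foldl (fun acc xpath =>
    acc ++ [pvFindA xs xpath (PySem.List.pyRange 1 (xpath.length : Int) 1)]) []

-- ===== PORT B =====
def altPrefix (t : List String) (L : Int) : String :=
  PySem.Str.join "/" (PySem.List.slice t none (some L))

def generate_segmentation_str_alt (xpaths : List String) : List String :=
  let split := xpaths.map pySplitSlash
  let distinct := PySem.List.dedup split
  let maxLen := split.foldl (fun m t => max m (t.length : Int)) 1
  let keys := distinct.flatMap (fun t =>
    (PySem.List.pyRange 1 maxLen 1).map (fun L => (L, altPrefix t L)))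
  let counts : PySem.Dict (Int × String) Int :=
    keys.foldl (fun d k => d.insert k (d.getD k 0 + 1)) PySem.Dict.empty
  split.map (fun t =>
    match (PySem.List.pyRange 1 (t.length : Int) 1).find?
        (fun L => counts.getD (L, altPrefix t L) 0 == 1) with
    | some L => altPrefix t L
    | none => PySem.Str.join "/" t)

-- ===== PRECONDITION & SPEC =====
def Spec_generate_segmentation_str (xpaths : List String) (out : List String) : Prop := out = generate_segmentation_str_alt xpaths
instance (xpaths : List String) (out : List String) : Decidable (Spec_generate_segmentation_str xpaths out) := by unfold Spec_generate_segmentation_str; infer_instance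

-- ===== CLAIM (what is proved, stated in full; the proofs are below) =====
def Claim_equal_generate_segmentation_str : Prop := ∀ (xpaths : List String), Dom_generate_segmentation_str xpaths → Spec_generate_segmentation_str xpaths (generate_segmentation_str xpaths)

-- ===== LEMMAS AND PROOFS =====

lemma altPrefix_eq_str_prefix (t : List String) (L : Int) :
    altPrefix t L = str_prefix t (some L) := rfl

lemma pvCheckA_eq_true_iff (xs : List (List String)) (t : List String) (p : String) (L : Int) :
    pvCheckA xs t p L = true ↔ ∀ o ∈ xs, o ≠ t → str_prefix o (some L) ≠ p := by
  induction xs with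
  | nil => simp [pvCheckA]
  | cons o rest ih =>
    simp only [pvCheckA]
    split_ifs with h1 h2
    · simp only [false_iff]
      intro h; exact (h o (by simp) h1) h2
    · simp only [ih, List.mem_cons]
      constructor
      · rintro h o' (rfl | ho') hne
        · exact h2
        · exact h o' ho' hne
      · intro h o' ho' hne; exact h o' (Or.inr ho') hne
    · simp only [ih, List.mem_cons]
      have ht : o = t := not_not.mp h1
      constructor
      · rintro h o' (rfl | ho') hne
        · exact absurd ht hne
        · exact h o' ho' hne
      · intro h o' ho' hne; exact h o' (Or.inr ho') hne

lemma inner_count (t : List String) (M L : Int) (k : String) :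
    ((PySem.List.pyRange 1 M 1).map (fun L' => (L', str_prefix t (some L')))).count (L, k)
      = (if 1 ≤ L ∧ L < M ∧ str_prefix t (some L) = k then 1 else 0) := by
  by_cases hk : 1 ≤ L ∧ L < M ∧ str_prefix t (some L) = k
  · obtain ⟨h1, h2, h3⟩ := hk
    have hinj : Function.Injective (fun L' : Int => (L', str_prefix t (some L'))) := by
      intro a b hab; simpa using congrArg Prod.fst hab
    have : (L, k) = (fun L' : Int => (L', str_prefix t (some L'))) L := by simp [h3]
    rw [this, List.count_map_of_injective _ _ hinj,
      if_pos (show 1 ≤ L ∧ L < M ∧ str_prefix t (some L) = k from ⟨h1, h2, h3⟩)]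
    exact List.count_eq_one_of_mem (PySem.List.nodup_pyRange_one 1 M)
      (PySem.List.mem_pyRange_one.mpr ⟨h1, h2⟩)
  · rw [if_neg hk, List.count_eq_zero]
    intro hmem
    obtain ⟨L', hL', heq⟩ := List.mem_map.mp hmem
    obtain ⟨rfl, rfl⟩ : L' = L ∧ str_prefix t (some L') = k := by
      constructor
      · simpa using congrArg Prod.fst heq
      · simpa using congrArg Prod.snd heq
    obtain ⟨ha, hb⟩ := PySem.List.mem_pyRange_one.mp hL'
    exact hk ⟨ha, hb, rfl⟩

lemma keys_count (distinct : List (List String)) (M L : Int) (k : String)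
    (h1 : 1 ≤ L) (h2 : L < M) :
    (distinct.flatMap (fun t =>
        (PySem.List.pyRange 1 M 1).map (fun L' => (L', str_prefix t (some L'))))).count (L, k)
      = distinct.countP (fun o => str_prefix o (some L) == k) := by
  induction distinct with
  | nil => simp
  | cons t rest ih =>
    rw [List.flatMap_cons, List.count_append, ih, List.countP_cons, inner_count]
    by_cases h3 : str_prefix t (some L) = k
    · simp only [h1, h2, h3, and_self, beq_self_eq_true, if_pos]
      omega
    · simp [h3]
    
lemma countP_eq_one_iff (d : List (List String)) (t : List String) (L : Int)
    (hm : t ∈ d) (hnd : d.Nodup) :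
    (d.countP (fun o => str_prefix o (some L) == str_prefix t (some L)) = 1)
      ↔ ∀ o ∈ d, o ≠ t → str_prefix o (some L) ≠ str_prefix t (some L) := by
  constructor
  · intro hc o ho hne heq
    -- both o and t are in the filtered list, which is nodup, so countP ≥ 2
    exfalso
    have hp : ∀ x ∈ d, x = o ∨ x = t → str_prefix x (some L) == str_prefix t (some L) := by
      rintro x _ (rfl | rfl)
      · simp [heq]
      · simp
    have ho' : o ∈ d.filter (fun x => str_prefix x (some L) == str_prefix t (some L)) :=
      List.mem_filter.mpr ⟨ho, hp o ho (Or.inl rfl)⟩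
    have ht' : t ∈ d.filter (fun x => str_prefix x (some L) == str_prefix t (some L)) :=
      List.mem_filter.mpr ⟨hm, hp t hm (Or.inr rfl)⟩
    have hterase : t ∈ (d.filter (fun x => str_prefix x (some L) == str_prefix t (some L))).erase o :=
      (List.mem_erase_of_ne (Ne.symm hne)).mpr ht'
    have h2le : 2 ≤ (d.filter (fun x => str_prefix x (some L) == str_prefix t (some L))).length := by
      have := List.length_erase_of_mem ho'
      have := List.length_pos_of_mem hterase
      omega
    rw [List.countP_eq_length_filter] at hc
    omega
  · intro h
    have hfil : d.filter (fun o => str_prefix o (some L) == str_prefix t (some L))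
        = d.filter (fun o => o == t) := by
      apply List.filter_congr
      intro o ho
      by_cases he : o = t
      · simp [he]
      · simp [he, h o ho he]
    rw [List.countP_eq_length_filter, hfil, ← List.countP_eq_length_filter]
    have : d.countP (fun o => o == t) = d.count t := by
      simp [List.count]
    rw [this]
    exact List.count_eq_one_of_mem hnd hm

lemma pvFindA_eq_find? (xs : List (List String)) (t : List String)
    (counts : PySem.Dict (Int × String) Int) (Ls : List Int)
    (h : ∀ L ∈ Ls, pvCheckA xs t (str_prefix t (some L)) L
        = (counts.getD (L, str_prefix t (some L)) 0 == 1)) :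
    pvFindA xs t Ls
      = (match Ls.find? (fun L => counts.getD (L, str_prefix t (some L)) 0 == 1) with
         | some L => str_prefix t (some L)
         | none => PySem.Str.join "/" t) := by
  induction Ls with
  | nil => simp [pvFindA, str_prefix, PySem.List.slice_none_none]
  | cons L rest ih =>
    simp only [pvFindA, List.find?_cons, h L (by simp)]
    cases hb : counts.getD (L, str_prefix t (some L)) 0 == 1
    · simpa using ih (fun L' hL' => h L' (by simp [hL']))
    · simp

-- ===== VERDICT (by name: the statement is the Claim_ definition above) =====
theorem generate_segmentation_str_spec : Claim_equal_generate_segmentation_str := by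
  intro xpaths _
  unfold Spec_generate_segmentation_str
  unfold generate_segmentation_str generate_segmentation_str_alt
  simp only [altPrefix_eq_str_prefix]
  rw [PySem.List.foldl_append_singleton_eq_map, List.nil_append]
  apply List.map_congr_left
  intro t ht
  rw [pvFindA_eq_find?]
  intro L hL
  obtain ⟨h1, h2⟩ := PySem.List.mem_pyRange_one.mp hL
  have hmaxt : (t.length : Int) ≤
      (xpaths.map pySplitSlash).foldl (fun m t => max m (t.length : Int)) 1 :=
    (PySem.List.le_foldl_max_int (xpaths.map pySplitSlash)
      (fun t => (t.length : Int)) 1).2 t ht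
  rw [PySem.Dict.getD_foldl_insert_add_one, PySem.Dict.getD_empty,
    keys_count _ _ _ _ h1 (lt_of_lt_of_le h2 hmaxt)]
  rw [Bool.eq_iff_iff, pvCheckA_eq_true_iff]
  have hmem : t ∈ PySem.List.dedup (xpaths.map pySplitSlash) :=
    (PySem.List.mem_dedup _ _).mpr ht
  have hiff := countP_eq_one_iff (PySem.List.dedup (xpaths.map pySplitSlash)) t L
    hmem (PySem.List.nodup_dedup _)
  constructor
  · intro h
    have : ∀ o ∈ PySem.List.dedup (xpaths.map pySplitSlash), o ≠ t →
        str_prefix o (some L) ≠ str_prefix t (some L) := by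
      intro o ho
      exact h o ((PySem.List.mem_dedup _ _).mp ho)
    simpa using hiff.mpr this
  · intro h
    have hcp : (PySem.List.dedup (xpaths.map pySplitSlash)).countP
        (fun o => str_prefix o (some L) == str_prefix t (some L)) = 1 := by
      revert h; simp
    intro o ho
    exact hiff.mp hcp o ((PySem.List.mem_dedup _ _).mpr ho)
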